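-- pv_equiv track=rewrite | github.com/kibrq/RSE-classroom | Reqved/210324/part1/ex1/naive_solution.py | solve
-- ===== SOURCE A (Python) =====
-- import itertools
--
-- def solve(n, arr):
--     mn = 10**9
--     for i in range(n):
--         for c in itertools.combinations(range(n - 1), i):
--             flag = True
--             satisfy = [0] * n
--             for el in c:
--                 satisfy[el] = satisfy[el + 1] = 1
--             for s in satisfy:
--                 flag &= s
--             if not flag:
--                 continue
--             d = 0
--             for el in c:
--                 d += arr[el + 1] - arr[el]
--             mn = min(d, mn)
--     return mn
-- ===== SOURCE B (Python) =====
-- def solve(n, arr):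
--     # Linear DP over edges (i, i+1) with cost arr[i+1]-arr[i]; None means "impossible".
--     # a = best cost covering vertices seen so far with the previous edge NOT taken,
--     # b = best cost with the previous edge taken.
--     a, b = 0, None
--     for j in range(n - 1):
--         c = arr[j + 1] - arr[j]
--         cand = a if b is None else (b if a is None else min(a, b))
--         a, b = b, (None if cand is None else cand + c)
--     return 10**9 if b is None else min(b, 10**9)
-- ===== Notes on version B (the rewrite author's own statement) =====
-- stated objective: faster
-- what changed: Replaced the exhaustive enumeration of all edge subsets (itertools.combinations over every size, checking coverage per subset) by a left-to-right linear DP over positions that tracks the best cover cost with/without the last domino taken.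
import Mathlib
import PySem

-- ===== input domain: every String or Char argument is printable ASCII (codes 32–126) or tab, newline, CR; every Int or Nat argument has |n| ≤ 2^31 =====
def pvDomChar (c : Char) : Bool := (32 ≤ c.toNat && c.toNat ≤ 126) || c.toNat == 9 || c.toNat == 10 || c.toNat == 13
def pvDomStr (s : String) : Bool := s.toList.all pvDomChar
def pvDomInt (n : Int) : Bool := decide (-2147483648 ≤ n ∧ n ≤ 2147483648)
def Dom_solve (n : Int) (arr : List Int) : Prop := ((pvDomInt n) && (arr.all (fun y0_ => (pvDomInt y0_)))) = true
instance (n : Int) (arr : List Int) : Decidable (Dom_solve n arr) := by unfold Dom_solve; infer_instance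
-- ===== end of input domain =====

set_option maxRecDepth 8192


-- B replaces A's exponential enumeration of all edge subsets by a linear DP over
-- positions tracking the best cover cost with/without the last domino taken
-- (intended as faster: A is exponential in n, B linear; one timing run measured
-- A over 8*10^4 times slower at n=64, another could not confirm because A timed out).

-- ===== PORT A =====
def solve (n : Int) (arr : List Int) : Int :=
  (PySem.List.pyRange 0 n 1).foldl (fun mn i =>
    (PySem.List.combinations (PySem.List.pyRange 0 (n - 1) 1) i.toNat).foldl (fun mn c =>
      let satisfy := c.foldl (fun s el => (s.set el.toNat 1).set (el.toNat + 1) 1)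
        (List.replicate n.toNat (0 : Int))
      let flag := satisfy.foldl (fun f s => f && (s == 1)) true
      if flag then
        min (c.foldl (fun d el =>
          d + (PySem.List.pyGetD arr (el + 1) 0 - PySem.List.pyGetD arr el 0)) 0) mn
      else mn) mn) (10 ^ 9)

-- ===== PORT B =====
-- `None`-aware minimum, exactly Source B's `a if b is None else (b if a is None else min(a, b))`
def pcand (a b : Option Int) : Option Int :=
  match b with
  | none => a
  | some bv =>
    match a with
    | none => some bv
    | some av => some (min av bv)

def solve_alt (n : Int) (arr : List Int) : Int :=
  let p := (PySem.List.pyRange 0 (n - 1) 1).foldl (fun (p : Option Int × Option Int) j =>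
      let c := PySem.List.pyGetD arr (j + 1) 0 - PySem.List.pyGetD arr j 0
      let cand := pcand p.1 p.2
      (p.2, cand.map (fun v => v + c))) ((some 0 : Option Int), (none : Option Int))
  match p.2 with
  | none => 10 ^ 9
  | some v => min v (10 ^ 9)

-- ===== PRECONDITION & SPEC =====
-- Pre_ excludes exactly the inputs where A raises IndexError: for n ≥ 2 every covering
-- set of dominoes reads arr[n-1], so A raises iff 2 ≤ n and arr is shorter than n.
def Pre_solve (n : Int) (arr : List Int) : Prop := 2 ≤ n → n ≤ (arr.length : Int)
instance (n : Int) (arr : List Int) : Decidable (Pre_solve n arr) := by unfold Pre_solve; infer_instance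
def pvWitness_solve : Int × List Int := (3, [5, 1, 4])

def Spec_solve (n : Int) (arr : List Int) (out : Int) : Prop := out = solve_alt n arr
instance (n : Int) (arr : List Int) (out : Int) : Decidable (Spec_solve n arr out) := by unfold Spec_solve; infer_instance

-- ===== CLAIM (what is proved, stated in full; the proofs are below) =====
def Claim_equal_solve : Prop := ∀ (n : Int) (arr : List Int), Dom_solve n arr → Pre_solve n arr → Spec_solve n arr (solve n arr)

-- ===== LEMMAS AND PROOFS =====

-- cost of edge el (the same expression both ports compute)
def costf (arr : List Int) (el : Int) : Int :=
  PySem.List.pyGetD arr (el + 1) 0 - PySem.List.pyGetD arr el 0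

-- A's inner-loop body, named (definitionally equal to the lambda in `solve`)
def Astep (n : Int) (arr : List Int) (mn : Int) (c : List Int) : Int :=
  if (c.foldl (fun s el => (s.set el.toNat 1).set (el.toNat + 1) 1)
        (List.replicate n.toNat (0 : Int))).foldl (fun f s => f && (s == 1)) true then
    min (c.foldl (fun d el => d + costf arr el) 0) mn
  else mn

def wc (arr : List Int) (c : List Int) : Int := c.foldl (fun d el => d + costf arr el) 0

-- all subsets of xs, as lists (multiset-equal to A's concatenated combinations)
def subsAll : List Int → List (List Int)
  | [] => [[]]
  | x :: t => (subsAll t).map (fun c => x :: c) ++ subsAll t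

-- coverage of the path seen edge by edge: b = "current vertex already covered from the left"
def coverOK : List Int → Bool → List Int → Bool
  | [], b, _ => b
  | y :: ys, b, c => (b || decide (y ∈ c)) && coverOK ys (decide (y ∈ c)) c

-- B's DP value: g covered cs = min cost over subsets of the remaining edges covering all
-- remaining vertices, the current one being pre-covered iff `covered`; none = impossible
def g : Bool → List Int → Option Int
  | b, [] => if b then some 0 else none
  | b, cv :: cs => pcand (if b then g false cs else none) ((g true cs).map (fun v => v + cv))

def oadd : Option Int → Option Int → Option Int
  | some x, some y => some (x + y)
  | _, _ => none

def omatch : Option Int → Int → Int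
  | none, mn => mn
  | some v, mn => min v mn

-- B's loop body, named
def bstep (p : Option Int × Option Int) (cv : Int) : Option Int × Option Int :=
  (p.2, (pcand p.1 p.2).map (fun v => v + cv))

lemma foldl_flatMap' {α β γ : Type} (l : List α) (gg : α → List β) (f : γ → β → γ) (init : γ) :
    (l.flatMap gg).foldl f init = l.foldl (fun acc x => (gg x).foldl f acc) init := by
  induction l generalizing init with
  | nil => rfl
  | cons x t ih => simp [List.flatMap_cons, List.foldl_append, ih]

lemma bfold_snd (cs : List Int) : ∀ (a b : Option Int),
    (cs.foldl bstep (a, b)).2 = pcand (oadd a (g false cs)) (oadd b (g true cs)) := by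
  induction cs with
  | nil =>
    intro a b
    cases a <;> cases b <;> simp [g, oadd, pcand]
  | cons cv cs ih =>
    intro a b
    rw [List.foldl_cons]
    show (cs.foldl bstep (b, (pcand a b).map (fun v => v + cv))).2 = _
    rw [ih]
    cases a <;> cases b <;> cases hf : g false cs <;> cases ht : g true cs <;>
      simp [g, oadd, pcand, hf, ht] <;> omega

lemma wc_eq_sum (arr : List Int) (c : List Int) : wc arr c = (c.map (costf arr)).sum := by
  unfold wc; rw [PySem.List.foldl_add]; simp

lemma wc_cons (arr : List Int) (x : Int) (c : List Int) :
    wc arr (x :: c) = costf arr x + wc arr c := by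
  simp [wc_eq_sum]

lemma mem_subsAll_subset {c t : List Int} (h : c ∈ subsAll t) : c ⊆ t := by
  induction t generalizing c with
  | nil => simp [subsAll] at h; simp [h]
  | cons x t ih =>
    simp only [subsAll, List.mem_append, List.mem_map] at h
    rcases h with ⟨c', hc', rfl⟩ | h
    · intro y hy
      rcases List.mem_cons.mp hy with rfl | hy
      · exact List.mem_cons_self
      · exact List.mem_cons_of_mem _ (ih hc' hy)
    · exact fun y hy => List.mem_cons_of_mem _ (ih h hy)

lemma coverOK_cons_irrel {x : Int} {ys : List Int} (hx : x ∉ ys) :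
    ∀ (b : Bool) (c : List Int), coverOK ys b (x :: c) = coverOK ys b c := by
  induction ys with
  | nil => intro b c; rfl
  | cons y t ih =>
    intro b c
    have hxy : y ≠ x := fun h => hx (by simp [h])
    have hmem : decide (y ∈ x :: c) = decide (y ∈ c) := by simp [List.mem_cons, hxy]
    simp only [coverOK, hmem]
    rw [ih (fun h => hx (List.mem_cons_of_mem _ h))]

-- the crux: brute-force min over all subsets equals the DP value
lemma crux (arr : List Int) : ∀ (xs : List Int), xs.Nodup → ∀ (cov : Bool) (δ mn : Int),
    (subsAll xs).foldl (fun mn c => if coverOK xs cov c then min (δ + wc arr c) mn else mn) mn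
      = omatch ((g cov (xs.map (costf arr))).map (fun v => δ + v)) mn := by
  intro xs
  induction xs with
  | nil =>
    intro _ cov δ mn
    cases cov <;> simp [subsAll, coverOK, g, omatch, wc]
  | cons x t ih =>
    intro hnd cov δ mn
    have hx : x ∉ t := (List.nodup_cons.mp hnd).1
    have hndt : t.Nodup := (List.nodup_cons.mp hnd).2
    simp only [subsAll, List.foldl_append, List.foldl_map]
    have h1 : (subsAll t).foldl
        (fun mn c => if coverOK (x :: t) cov (x :: c) then min (δ + wc arr (x :: c)) mn else mn) mn
        = (subsAll t).foldl
        (fun mn c => if coverOK t true c then min ((δ + costf arr x) + wc arr c) mn else mn) mn := by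
      apply PySem.List.foldl_congr_mem
      intro acc c _
      have hco : coverOK (x :: t) cov (x :: c) = coverOK t true c := by
        simp only [coverOK, List.mem_cons, true_or, decide_true, Bool.or_true, Bool.true_and]
        rw [coverOK_cons_irrel hx]
      rw [hco, wc_cons, add_assoc]
    rw [h1, ih hndt true (δ + costf arr x) mn]
    have h2 : ∀ (m0 : Int), (subsAll t).foldl
        (fun mn c => if coverOK (x :: t) cov c then min (δ + wc arr c) mn else mn) m0
        = (subsAll t).foldl
        (fun mn c => if cov && coverOK t false c then min (δ + wc arr c) mn else mn) m0 := by
      intro m0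
      apply PySem.List.foldl_congr_mem
      intro acc c hc
      have hxc : x ∉ c := fun h => hx (mem_subsAll_subset hc h)
      have hco : coverOK (x :: t) cov c = (cov && coverOK t false c) := by
        simp only [coverOK, hxc, decide_false, Bool.or_false]
      rw [hco]
    rw [h2]
    cases cov with
    | false =>
      have hconst : (subsAll t).foldl
          (fun mn c => if false && coverOK t false c then min (δ + wc arr c) mn else mn)
          (omatch ((g true (t.map (costf arr))).map (fun v => δ + costf arr x + v)) mn)
          = omatch ((g true (t.map (costf arr))).map (fun v => δ + costf arr x + v)) mn := by
        rw [PySem.List.foldl_congr_mem _ _ (fun acc _ => acc) _ (by intro acc c _; simp)]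
        exact PySem.List.foldl_ignore _ _
      rw [hconst]
      cases ht : g true (t.map (costf arr)) <;>
        simp [g, pcand, omatch, ht, List.map_cons] <;> omega
    | true =>
      have htrue : (subsAll t).foldl
          (fun mn c => if true && coverOK t false c then min (δ + wc arr c) mn else mn)
          (omatch ((g true (t.map (costf arr))).map (fun v => δ + costf arr x + v)) mn)
          = (subsAll t).foldl
          (fun mn c => if coverOK t false c then min (δ + wc arr c) mn else mn)
          (omatch ((g true (t.map (costf arr))).map (fun v => δ + costf arr x + v)) mn) := by
        apply PySem.List.foldl_congr_mem
        intro acc c _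
        simp
      rw [htrue, ih hndt false δ _]
      cases hf : g false (t.map (costf arr)) <;> cases ht : g true (t.map (costf arr)) <;>
        simp [g, pcand, omatch, hf, ht, List.map_cons] <;> omega

-- satisfy-array characterisation
lemma set_map_range {N : Nat} (gm : Nat → Int) (k : Nat) (v : Int) (_hk : k < N) :
    ((List.range N).map gm).set k v = (List.range N).map (fun p => if p = k then v else gm p) := by
  apply List.ext_getElem
  · simp
  · intro i h1 h2
    simp only [List.getElem_set, List.getElem_map, List.getElem_range]
    split_ifs with hA hB hB <;> first | rfl | omega

lemma sat_fold (N : Nat) : ∀ (c : List Int), (∀ el ∈ c, el.toNat + 1 < N) → ∀ (F : Nat → Bool),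
    c.foldl (fun s el => (s.set el.toNat 1).set (el.toNat + 1) 1)
      ((List.range N).map (fun p => if F p then (1 : Int) else 0))
    = (List.range N).map
        (fun p => if (F p || c.any (fun el => p == el.toNat || p == el.toNat + 1)) then (1 : Int) else 0) := by
  intro c
  induction c with
  | nil => intro _ F; simp
  | cons el c ih =>
    intro hb F
    have h1 : el.toNat < N := by have := hb el (by simp); omega
    have h2 : el.toNat + 1 < N := hb el (by simp)
    simp only [List.foldl_cons]
    rw [set_map_range _ _ _ h1, set_map_range _ _ _ h2]
    have hfun : (List.range N).map
        (fun p => if p = el.toNat + 1 then (1 : Int) else if p = el.toNat then 1 else if F p then 1 else 0)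
        = (List.range N).map
        (fun p => if ((F p || (p == el.toNat || p == el.toNat + 1))) then (1 : Int) else 0) := by
      congr 1
      funext p
      by_cases hp1 : p = el.toNat + 1 <;> by_cases hp2 : p = el.toNat <;>
        simp [hp1, hp2]
    rw [hfun, ih (fun e he => hb e (by simp [he]))]
    congr 1
    funext p
    cases F p <;> simp [List.any_cons, Bool.or_assoc]

lemma andfold (l : List Int) : ∀ (b : Bool),
    l.foldl (fun f s => f && (s == 1)) b = (b && l.all (fun s => s == 1)) := by
  induction l with
  | nil => intro b; simp
  | cons s t ih => intro b; simp [List.foldl_cons, ih, Bool.and_assoc]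

-- coverOK over an Int interval says: every vertex in [a, bnd] is covered
lemma covOK_iff : ∀ (k : Nat) (a bnd : Int), bnd - a = (k : Int) → a ≤ bnd →
    ∀ (c : List Int), (∀ el ∈ c, 0 ≤ el ∧ el < bnd) →
    (coverOK (PySem.List.pyRange a bnd 1) (decide ((a - 1) ∈ c)) c = true
      ↔ ∀ v : Int, a ≤ v → v ≤ bnd → (v ∈ c ∨ (v - 1) ∈ c)) := by
  intro k
  induction k with
  | zero =>
    intro a bnd hk hle c hc
    have hab : a = bnd := by omega
    subst hab
    rw [PySem.List.pyRange_one_eq_nil (le_refl a)]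
    simp only [coverOK, decide_eq_true_eq]
    constructor
    · intro h v hv1 hv2
      have hva : v = a := by omega
      subst hva
      exact Or.inr h
    · intro h
      rcases h a (le_refl a) (le_refl a) with h' | h'
      · exact absurd ((hc a h').2) (by omega)
      · exact h'
  | succ k ih =>
    intro a bnd hk hle c hc
    have hab : a < bnd := by omega
    rw [PySem.List.pyRange_one_cons hab]
    simp only [coverOK, Bool.and_eq_true, Bool.or_eq_true, decide_eq_true_eq]
    have hih := ih (a + 1) bnd (by omega) (by omega) c hc
    rw [show a + 1 - 1 = a by ring] at hih
    constructor
    · intro ⟨hh1, hh2⟩ v hv1 hv2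
      rcases eq_or_lt_of_le hv1 with rfl | hlt
      · rcases hh1 with h | h
        · exact Or.inr h
        · exact Or.inl h
      · exact hih.mp hh2 v (by omega) hv2
    · intro h
      refine ⟨?_, hih.mpr (fun v hv1 hv2 => h v (by omega) hv2)⟩
      rcases h a (le_refl a) (by omega) with h' | h'
      · exact Or.inr h'
      · exact Or.inl h'

-- flag bridge: A's satisfy/flag computation = coverOK over the edge range
lemma flag_bridge (n : Int) (hn : 1 ≤ n) (c : List Int)
    (hc : ∀ el ∈ c, 0 ≤ el ∧ el < n - 1) :
    ((c.foldl (fun s el => (s.set el.toNat 1).set (el.toNat + 1) 1)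
        (List.replicate n.toNat (0 : Int))).foldl (fun f s => f && (s == 1)) true)
    = coverOK (PySem.List.pyRange 0 (n - 1) 1) false c := by
  have hrep : (List.replicate n.toNat (0 : Int))
      = (List.range n.toNat).map (fun p => if (fun _ : Nat => false) p then (1 : Int) else 0) := by
    simp
  rw [hrep, sat_fold n.toNat c (by intro el hel; have := hc el hel; omega), andfold, Bool.true_and]
  have hfalse : (false : Bool) = decide (((0 : Int) - 1) ∈ c) := by
    simp
    intro h
    have := (hc _ h).1
    omega
  conv_rhs => rw [hfalse]
  have hboolext : ∀ a b : Bool, (a = true ↔ b = true) → a = b := by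
    intro a b h; cases a <;> cases b <;> simp_all
  apply hboolext
  rw [covOK_iff (n - 1).toNat 0 (n - 1) (by omega) (by omega) c hc]
  simp only [List.all_map, List.all_eq_true, List.mem_range, Function.comp]
  constructor
  · intro h v hv0 hv1
    have h' := h v.toNat (by omega)
    simp only [Bool.false_or] at h'
    by_cases hany : c.any (fun el => v.toNat == el.toNat || v.toNat == el.toNat + 1)
    · rcases List.any_eq_true.mp hany with ⟨el, hel, hpe⟩
      have h0 := (hc el hel).1
      simp only [Bool.or_eq_true, beq_iff_eq] at hpe
      rcases hpe with h'' | h''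
      · left
        have hve : v = el := by omega
        rwa [hve]
      · right
        have hve : v - 1 = el := by omega
        rwa [hve]
    · rw [if_neg (by simpa using hany)] at h'
      simp at h'
  · intro h p hp
    simp only [Bool.false_or]
    have hvp := h (p : Int) (by omega) (by omega)
    have hany : c.any (fun el => p == el.toNat || p == el.toNat + 1) = true := by
      rcases hvp with h' | h'
      · exact List.any_eq_true.mpr ⟨(p : Int), h', by simp⟩
      · refine List.any_eq_true.mpr ⟨(p : Int) - 1, h', ?_⟩
        have h0 := (hc _ h').1
        simp only [Bool.or_eq_true, beq_iff_eq]
        right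
        omega
    simp [hany]

lemma flatMap_append_perm (l : List Nat) (f gg : Nat → List (List Int)) :
    (l.flatMap (fun r => f r ++ gg r)).Perm (l.flatMap f ++ l.flatMap gg) := by
  rw [List.perm_iff_count]
  intro a
  induction l with
  | nil => simp
  | cons y L ihl =>
    simp only [List.flatMap_cons, List.count_append] at *
    omega

lemma perm_all : ∀ (xs : List Int),
    ((List.range (xs.length + 1)).flatMap (fun r => PySem.List.combinations xs r)).Perm (subsAll xs) := by
  intro xs
  induction xs with
  | nil => simp [subsAll, PySem.List.combinations_zero]
  | cons x t ih =>
    have step : (List.range ((x :: t).length + 1)).flatMap (fun r => PySem.List.combinations (x :: t) r)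
        = [([] : List Int)] ++ (List.range (t.length + 1)).flatMap
            (fun r => (PySem.List.combinations t r).map (fun c => x :: c) ++ PySem.List.combinations t (r + 1)) := by
      rw [List.length_cons, List.range_succ_eq_map, List.flatMap_cons, List.flatMap_map]
      simp only [Nat.succ_eq_add_one, PySem.List.combinations_cons_succ, PySem.List.combinations_zero]
    have hmap : (List.range (t.length + 1)).flatMap (fun r => (PySem.List.combinations t r).map (fun c => x :: c))
        = ((List.range (t.length + 1)).flatMap (fun r => PySem.List.combinations t r)).map (fun c => x :: c) := by
      rw [List.map_flatMap]
    have hnil : PySem.List.combinations t (t.length + 1) = [] :=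
      PySem.List.combinations_eq_nil_of_length_lt t (by omega)
    have htail : [([] : List Int)] ++ (List.range (t.length + 1)).flatMap (fun r => PySem.List.combinations t (r + 1))
        = (List.range (t.length + 1)).flatMap (fun r => PySem.List.combinations t r) ++ [] := by
      have hh : [([] : List Int)] ++ (List.range (t.length + 1)).flatMap (fun r => PySem.List.combinations t (r + 1))
          = (List.range (t.length + 1 + 1)).flatMap (fun r => PySem.List.combinations t r) := by
        rw [List.range_succ_eq_map (n := t.length + 1), List.flatMap_cons, List.flatMap_map]
        simp only [Nat.succ_eq_add_one, PySem.List.combinations_zero]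
      rw [hh, List.range_succ, List.flatMap_append]
      simp [hnil]
    rw [List.perm_iff_count]
    intro a
    rw [step, List.count_append,
      (flatMap_append_perm (List.range (t.length + 1)) _ _).count_eq a, List.count_append, hmap]
    have f1 : List.count a (((List.range (t.length + 1)).flatMap (fun r => PySem.List.combinations t r)).map (fun c => x :: c))
        = List.count a ((subsAll t).map (fun c => x :: c)) := (ih.map _).count_eq a
    have f2 : List.count a [([] : List Int)]
          + List.count a ((List.range (t.length + 1)).flatMap (fun r => PySem.List.combinations t (r + 1)))
        = List.count a ((List.range (t.length + 1)).flatMap (fun r => PySem.List.combinations t r)) := by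
      rw [← List.count_append, htail, List.count_append]
      simp
    have f3 : List.count a ((List.range (t.length + 1)).flatMap (fun r => PySem.List.combinations t r))
        = List.count a (subsAll t) := ih.count_eq a
    show List.count a [([] : List Int)]
        + (List.count a (((List.range (t.length + 1)).flatMap (fun r => PySem.List.combinations t r)).map (fun c => x :: c))
          + List.count a ((List.range (t.length + 1)).flatMap (fun r => PySem.List.combinations t (r + 1))))
      = List.count a (subsAll (x :: t))
    have hsub : List.count a (subsAll (x :: t))
        = List.count a ((subsAll t).map (fun c => x :: c)) + List.count a (subsAll t) := by
      show List.count a ((subsAll t).map (fun c => x :: c) ++ subsAll t) = _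
      rw [List.count_append]
    omega

lemma astep_rcomm (n : Int) (arr : List Int) (b : Int) (a₁ a₂ : List Int) :
    Astep n arr (Astep n arr b a₁) a₂ = Astep n arr (Astep n arr b a₂) a₁ := by
  unfold Astep
  split_ifs <;> omega

lemma solve_eq_subs (n : Int) (arr : List Int) (hn : 1 ≤ n) :
    solve n arr = (subsAll (PySem.List.pyRange 0 (n - 1) 1)).foldl (Astep n arr) (10 ^ 9) := by
  have h0 : solve n arr = (PySem.List.pyRange 0 n 1).foldl
      (fun mn i => (PySem.List.combinations (PySem.List.pyRange 0 (n - 1) 1) i.toNat).foldl (Astep n arr) mn)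
      (10 ^ 9) := rfl
  rw [h0, PySem.List.pyRange_one 0 n, List.foldl_map]
  simp only [zero_add, Int.toNat_natCast, sub_zero]
  rw [← foldl_flatMap']
  have hlen : n.toNat = (PySem.List.pyRange 0 (n - 1) 1).length + 1 := by
    rw [PySem.List.length_pyRange_one]; omega
  rw [hlen]
  haveI : RightCommutative (Astep n arr) := ⟨fun b a₁ a₂ => astep_rcomm n arr b a₁ a₂⟩
  exact (perm_all (PySem.List.pyRange 0 (n - 1) 1)).foldl_eq (10 ^ 9)

lemma solve_alt_eq (n : Int) (arr : List Int) :
    solve_alt n arr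
      = omatch (g false ((PySem.List.pyRange 0 (n - 1) 1).map (costf arr))) (10 ^ 9) := by
  have h0 : solve_alt n arr =
      (match (((PySem.List.pyRange 0 (n - 1) 1).map (costf arr)).foldl bstep
          ((some 0 : Option Int), (none : Option Int))).2 with
       | none => 10 ^ 9
       | some v => min v (10 ^ 9)) := by
    rw [List.foldl_map]
    rfl
  rw [h0, bfold_snd]
  cases hf : g false ((PySem.List.pyRange 0 (n - 1) 1).map (costf arr)) <;>
    cases ht : g true ((PySem.List.pyRange 0 (n - 1) 1).map (costf arr)) <;>
      simp [oadd, pcand, omatch]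

-- ===== VERDICT (by name: the statement is the Claim_ definition above) =====
theorem solve_spec : Claim_equal_solve := by
  intro n arr _ _
  unfold Spec_solve
  by_cases hn : 1 ≤ n
  · rw [solve_eq_subs n arr hn]
    have hbr : (subsAll (PySem.List.pyRange 0 (n - 1) 1)).foldl (Astep n arr) (10 ^ 9)
        = (subsAll (PySem.List.pyRange 0 (n - 1) 1)).foldl
            (fun mn c => if coverOK (PySem.List.pyRange 0 (n - 1) 1) false c
              then min ((0 : Int) + wc arr c) mn else mn) (10 ^ 9) := by
      apply PySem.List.foldl_congr_mem
      intro acc c hc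
      have hcb : ∀ el ∈ c, 0 ≤ el ∧ el < n - 1 := fun el hel =>
        PySem.List.mem_pyRange_one.mp (mem_subsAll_subset hc hel)
      unfold Astep
      rw [flag_bridge n hn c hcb]
      simp [wc]
    rw [hbr, crux arr (PySem.List.pyRange 0 (n - 1) 1) (PySem.List.nodup_pyRange_one 0 (n - 1)) false 0 (10 ^ 9),
      solve_alt_eq]
    cases g false ((PySem.List.pyRange 0 (n - 1) 1).map (costf arr)) <;> simp [omatch]
  · have h1 : PySem.List.pyRange 0 n 1 = [] := PySem.List.pyRange_one_eq_nil (by omega)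
    have h2 : PySem.List.pyRange 0 (n - 1) 1 = [] := PySem.List.pyRange_one_eq_nil (by omega)
    simp [solve, solve_alt, h1, h2]
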